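-- pv_equiv track=rewrite | github.com/therobwhite/python-data-eng | app/nypd_analysis.py | count_arrests_by_age
-- ===== SOURCE A (Python) =====
-- def count_arrests_by_age(nypd_list):
--     age_group_dict = {}
--     for row_dict in nypd_list:
--         (age_key, pd_key)   = row_dict["AGE_GROUP"], row_dict["PD_CD"]
--         if age_key in age_group_dict.keys():
--             if pd_key in age_group_dict[age_key].keys():
--                 count = age_group_dict[age_key][pd_key]
--                 count += 1
--                 age_group_dict[age_key].update({pd_key: count})
--             else:
--                 age_group_dict[age_key][pd_key] = 1
--         else:
--             # we have a new age group so start from 1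
--             age_group_dict[age_key] = {pd_key: 1}
--
--     return age_group_dict
-- ===== SOURCE B (Python) =====
-- def count_arrests_by_age(nypd_list):
--     # pass 1: group the PD codes by age group, in first-encounter order
--     groups = {}
--     for row in nypd_list:
--         groups.setdefault(row["AGE_GROUP"], []).append(row["PD_CD"])
--     # pass 2: count each group's PD codes
--     result = {}
--     for age, pds in groups.items():
--         counts = {}
--         for pd in pds:
--             counts[pd] = counts.get(pd, 0) + 1
--         result[age] = counts
--     return result
-- ===== Notes on version B (the rewrite author's own statement) =====
-- stated objective: alternative
-- what changed: A interleaves existence checks and nested-dict updates in one loop; B decomposes into two differently-shaped passes: first group PD codes into per-age lists (setdefault/append), then count each group's list into an inner dict.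
import Mathlib
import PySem

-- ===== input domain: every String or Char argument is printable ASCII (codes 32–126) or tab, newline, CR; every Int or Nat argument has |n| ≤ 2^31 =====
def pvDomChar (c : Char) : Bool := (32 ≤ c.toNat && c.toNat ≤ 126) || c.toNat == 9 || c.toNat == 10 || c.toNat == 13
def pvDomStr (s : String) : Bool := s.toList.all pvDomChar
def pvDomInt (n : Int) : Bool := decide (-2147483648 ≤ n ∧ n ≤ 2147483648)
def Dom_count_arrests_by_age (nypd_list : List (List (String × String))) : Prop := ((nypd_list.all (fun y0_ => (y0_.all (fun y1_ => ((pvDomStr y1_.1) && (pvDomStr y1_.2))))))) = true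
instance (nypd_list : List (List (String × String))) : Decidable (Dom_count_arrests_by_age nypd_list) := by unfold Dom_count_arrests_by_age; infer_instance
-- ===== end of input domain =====

-- B replaces A's single interleaved branch-on-existence build by two passes: group PD codes
-- per age group, then count each group's list (alternative decomposition, same cost).

-- shared row lookup: row["AGE_GROUP"] / row["PD_CD"] (first match; Pre_ guarantees presence)
def pvAgeOf (row : List (String × String)) : String := (PySem.Dict.mk row).getD "AGE_GROUP" ""
def pvPdOf (row : List (String × String)) : String := (PySem.Dict.mk row).getD "PD_CD" ""

-- ===== PORT A =====
def pvStepA (d : PySem.Dict String (PySem.Dict String Int)) (row : List (String × String)) :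
    PySem.Dict String (PySem.Dict String Int) :=
  let age_key := pvAgeOf row
  let pd_key := pvPdOf row
  if d.contains age_key then
    let inner := d.getD age_key PySem.Dict.empty
    if inner.contains pd_key then
      let count := inner.getD pd_key 0
      d.insert age_key (inner.insert pd_key (count + 1))
    else
      d.insert age_key (inner.insert pd_key 1)
  else
    d.insert age_key (PySem.Dict.mk [(pd_key, 1)])

def count_arrests_by_age (nypd_list : List (List (String × String))) : List (String × List (String × Int)) :=
  ((nypd_list.foldl pvStepA PySem.Dict.empty).items).map (fun q => (q.1, q.2.items))

-- ===== PORT B =====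
def pvGroupStep (d : PySem.Dict String (List String)) (row : List (String × String)) :
    PySem.Dict String (List String) :=
  d.modify (pvAgeOf row) [] (· ++ [pvPdOf row])

def pvCountPds (pds : List String) : PySem.Dict String Int :=
  pds.foldl (fun c p => c.insert p (c.getD p 0 + 1)) PySem.Dict.empty

def count_arrests_by_age_alt (nypd_list : List (List (String × String))) : List (String × List (String × Int)) :=
  ((nypd_list.foldl pvGroupStep PySem.Dict.empty).items).map (fun q => (q.1, (pvCountPds q.2).items))

-- ===== PRECONDITION & SPEC =====
-- Pre_: every row has both keys "AGE_GROUP" and "PD_CD"; otherwise Python A raises KeyError.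
def Pre_count_arrests_by_age (nypd_list : List (List (String × String))) : Prop :=
  (nypd_list.all (fun row => (PySem.Dict.mk row).contains "AGE_GROUP" && (PySem.Dict.mk row).contains "PD_CD")) = true
instance (nypd_list : List (List (String × String))) : Decidable (Pre_count_arrests_by_age nypd_list) := by unfold Pre_count_arrests_by_age; infer_instance

def pvWitness_count_arrests_by_age : (List (List (String × String))) :=
  [[("AGE_GROUP", "18-24"), ("PD_CD", "397")], [("AGE_GROUP", "18-24"), ("PD_CD", "101")]]

def Spec_count_arrests_by_age (nypd_list : List (List (String × String))) (out : List (String × List (String × Int))) : Prop := out = count_arrests_by_age_alt nypd_list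
instance (nypd_list : List (List (String × String))) (out : List (String × List (String × Int))) : Decidable (Spec_count_arrests_by_age nypd_list out) := by unfold Spec_count_arrests_by_age; infer_instance

-- ===== CLAIM (what is proved, stated in full; the proofs are below) =====
def Claim_equal_count_arrests_by_age : Prop := ∀ (nypd_list : List (List (String × String))), Dom_count_arrests_by_age nypd_list → Pre_count_arrests_by_age nypd_list → Spec_count_arrests_by_age nypd_list (count_arrests_by_age nypd_list)

-- ===== LEMMAS AND PROOFS =====

-- A's branchy step is uniformly "insert the bumped inner dict"
theorem pvStepA_eq (d : PySem.Dict String (PySem.Dict String Int)) (row : List (String × String)) :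
    pvStepA d row =
      d.insert (pvAgeOf row)
        ((d.getD (pvAgeOf row) PySem.Dict.empty).insert (pvPdOf row)
          ((d.getD (pvAgeOf row) PySem.Dict.empty).getD (pvPdOf row) 0 + 1)) := by
  unfold pvStepA
  dsimp only
  split_ifs with h1 h2
  · rfl
  · simp only [Bool.not_eq_true] at h2
    rw [PySem.Dict.getD_of_not_contains _ _ h2]
    norm_num
  · simp only [Bool.not_eq_true] at h1
    rw [PySem.Dict.getD_of_not_contains _ _ h1]
    rfl

theorem pvStepA_funext : pvStepA = fun d row =>
      d.insert (pvAgeOf row)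
        ((d.getD (pvAgeOf row) PySem.Dict.empty).insert (pvPdOf row)
          ((d.getD (pvAgeOf row) PySem.Dict.empty).getD (pvPdOf row) 0 + 1)) :=
  funext fun d => funext fun row => pvStepA_eq d row

theorem A_getD (l : List (List (String × String))) (a : String) :
    ∀ d : PySem.Dict String (PySem.Dict String Int),
      (l.foldl pvStepA d).getD a PySem.Dict.empty =
        ((l.filter (fun row => pvAgeOf row == a)).map pvPdOf).foldl
          (fun c p => c.insert p (c.getD p 0 + 1)) (d.getD a PySem.Dict.empty) := by
  induction l with
  | nil => intro d; simp
  | cons row rest ih =>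
    intro d
    simp only [List.foldl_cons, ih, pvStepA_eq]
    by_cases h : pvAgeOf row = a
    · subst h
      simp [PySem.Dict.getD_insert_self]
    · simp [PySem.Dict.getD_insert, h, Ne.symm h]

theorem A_keys (l : List (List (String × String))) :
    (l.foldl pvStepA PySem.Dict.empty).keys = PySem.Set.ofList (l.map pvAgeOf) := by
  rw [pvStepA_funext, PySem.Dict.keys_foldl_insert_key l pvAgeOf]
  simp [PySem.Set.update_nil_left]

theorem A_nodup (l : List (List (String × String))) :
    (l.foldl pvStepA PySem.Dict.empty).keys.Nodup := by
  rw [pvStepA_funext]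
  exact PySem.Dict.nodup_keys_foldl_insert_key l pvAgeOf _ _ PySem.Dict.nodup_keys_empty

theorem pvGroupStep_funext : pvGroupStep = fun d row =>
      d.modify (pvAgeOf row) [] (fun v => (fun _ r v => v ++ [pvPdOf r]) d row v) := rfl

theorem B_keys (l : List (List (String × String))) :
    (l.foldl pvGroupStep PySem.Dict.empty).keys = PySem.Set.ofList (l.map pvAgeOf) := by
  rw [pvGroupStep_funext, PySem.Dict.keys_foldl_modify_key l pvAgeOf]
  simp [PySem.Set.update_nil_left]

theorem B_nodup (l : List (List (String × String))) :
    (l.foldl pvGroupStep PySem.Dict.empty).keys.Nodup := by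
  rw [pvGroupStep_funext]
  exact PySem.Dict.nodup_keys_foldl_modify_key l pvAgeOf _ _ _ PySem.Dict.nodup_keys_empty

theorem B_getD (l : List (List (String × String))) (a : String) :
    (l.foldl pvGroupStep PySem.Dict.empty).getD a [] =
      (l.filter (fun row => pvAgeOf row == a)).map pvPdOf := by
  have hm : l.foldl pvGroupStep PySem.Dict.empty =
      (l.map (fun row => (pvAgeOf row, pvPdOf row))).foldl
        (fun d p => d.modify p.1 [] (fun v => v ++ [p.2])) PySem.Dict.empty := by
    rw [List.foldl_map]; rfl
  rw [hm, PySem.Dict.getD_foldl_modify_append]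
  simp [List.filter_map, List.map_map, Function.comp_def]

-- ===== VERDICT (by name: the statement is the Claim_ definition above) =====
theorem count_arrests_by_age_spec : Claim_equal_count_arrests_by_age := by
  intro l _ _
  unfold Spec_count_arrests_by_age count_arrests_by_age count_arrests_by_age_alt
  rw [PySem.Dict.items_eq_map_keys _ (A_nodup l) PySem.Dict.empty,
      PySem.Dict.items_eq_map_keys _ (B_nodup l) ([] : List String),
      A_keys, B_keys, List.map_map, List.map_map]
  refine List.map_congr_left (fun a _ => ?_)
  simp only [Function.comp]
  rw [B_getD, A_getD]
  rfl
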